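-- pv_equiv track=rewrite | github.com/raeez/chiral-bar-cobar | compute/lib/bar_cohomology_dimensions.py | betagamma_bar_cohomology_formula
-- ===== SOURCE A (Python) =====
-- def betagamma_bar_cohomology_formula(weight: int) -> int:
--     """Bar cohomology dim at given weight for beta-gamma.
--
--     Generating function: sqrt((1+x)/(1-3x)).
--     Recurrence: n*a(n) = 2n*a(n-1) + 3(n-2)*a(n-2), a(1)=2, a(2)=4.
--     OEIS A001700 shifted: central Delannoy numbers or related.
--     """
--     if weight < 1:
--         return 0
--     if weight == 1:
--         return 2
--     if weight == 2:
--         return 4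
--     a = [0, 2, 4]
--     for n in range(3, weight + 1):
--         val = (2 * n * a[n-1] + 3 * (n - 2) * a[n-2]) // n
--         a.append(val)
--     return a[weight]
-- ===== SOURCE B (Python) =====
-- def betagamma_bar_cohomology_formula(weight: int) -> int:
--     """Closed-form binomial sum instead of iterating the recurrence.
--
--     [x^w] sqrt((1+x)/(1-3x)) = T(w) + T(w-1), where T(m) = [x^m](1+x+x^2)^m
--     = sum_k C(m,2k)*C(2k,k) (central trinomial coefficient).  Each summand is
--     obtained from the previous one by its exact multiplicative ratio.
--     """
--     if weight < 1:
--         return 0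
--
--     def trinomial(m):
--         total, u = 0, 1   # u = C(m,2k)*C(2k,k)
--         for k in range(m // 2 + 1):
--             total += u
--             u = u * (m - 2 * k) * (m - 2 * k - 1) // ((k + 1) * (k + 1))
--         return total
--
--     return trinomial(weight) + trinomial(weight - 1)
-- ===== Notes on version B (the rewrite author's own statement) =====
-- stated objective: alternative
-- what changed: Replaces the iteration of the two-term variable-coefficient recurrence on a(n) by direct evaluation of the closed-form binomial sum a(w) = sum_k (C(w,2k)+C(w-1,2k))*C(2k,k) (the coefficient of x^w in sqrt((1+x)/(1-3x)) via central trinomial coefficients), with the binomial factors maintained multiplicatively.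
import Mathlib
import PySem

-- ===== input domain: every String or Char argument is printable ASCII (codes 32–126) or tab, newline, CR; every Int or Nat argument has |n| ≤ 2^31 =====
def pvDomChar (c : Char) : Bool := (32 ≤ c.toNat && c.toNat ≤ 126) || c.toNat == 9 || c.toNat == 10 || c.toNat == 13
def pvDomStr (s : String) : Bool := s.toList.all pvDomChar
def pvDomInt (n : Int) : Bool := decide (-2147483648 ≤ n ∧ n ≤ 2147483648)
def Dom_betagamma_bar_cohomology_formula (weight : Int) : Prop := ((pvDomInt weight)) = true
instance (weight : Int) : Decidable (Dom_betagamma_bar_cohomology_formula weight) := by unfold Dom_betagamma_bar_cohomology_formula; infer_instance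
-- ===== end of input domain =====

-- B replaces A's iteration of the two-term recurrence on a(n) by direct evaluation of
-- the closed-form binomial sum a(w) = Σ_k (C(w,2k)+C(w-1,2k))·C(2k,k) (central trinomial
-- coefficients of the generating function), maintained multiplicatively (objective: alternative).

-- ===== PORT A =====
-- loop body of A: a.append((2*n*a[n-1] + 3*(n-2)*a[n-2]) // n)
def pvStepA (a : List Int) (n : Int) : List Int :=
  a ++ [PySem.Int.floordiv (2 * n * PySem.List.pyGetD a (n - 1) 0
          + 3 * (n - 2) * PySem.List.pyGetD a (n - 2) 0) n]

def betagamma_bar_cohomology_formula (weight : Int) : Int :=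
  if weight < 1 then 0
  else if weight = 1 then 2
  else if weight = 2 then 4
  else
    let a := (PySem.List.pyRange 3 (weight + 1) 1).foldl pvStepA [0, 2, 4]
    PySem.List.pyGetD a weight 0

-- ===== PORT B =====
-- inner helper trinomial(m): total += u; u = u*(m-2k)*(m-2k-1) // ((k+1)*(k+1))
def pvStepT (m : Int) (st : Int × Int) (k : Int) : Int × Int :=
  (st.1 + st.2,
   PySem.Int.floordiv (st.2 * (m - 2 * k) * (m - 2 * k - 1)) ((k + 1) * (k + 1)))

def pvTri (m : Int) : Int :=
  ((PySem.List.pyRange 0 (PySem.Int.floordiv m 2 + 1) 1).foldl (pvStepT m) (0, 1)).1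

def betagamma_bar_cohomology_formula_alt (weight : Int) : Int :=
  if weight < 1 then 0
  else pvTri weight + pvTri (weight - 1)

-- ===== PRECONDITION & SPEC =====
def Spec_betagamma_bar_cohomology_formula (weight : Int) (out : Int) : Prop := out = betagamma_bar_cohomology_formula_alt weight
instance (weight : Int) (out : Int) : Decidable (Spec_betagamma_bar_cohomology_formula weight out) := by unfold Spec_betagamma_bar_cohomology_formula; infer_instance

-- ===== CLAIM (what is proved, stated in full; the proofs are below) =====
def Claim_equal_betagamma_bar_cohomology_formula : Prop := ∀ (weight : Int), Dom_betagamma_bar_cohomology_formula weight → Spec_betagamma_bar_cohomology_formula weight (betagamma_bar_cohomology_formula weight)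

-- ===== LEMMAS AND PROOFS =====

-- T(m) = [x^m](1+x+x^2)^m = Σ_k C(m,2k)C(2k,k) (central trinomial coefficient),
-- V(m) = [x^(m-1)](1+x+x^2)^m = Σ_j C(m,2j+1)C(2j+1,j) (its left neighbour).
def pvT (m : ℕ) : ℤ := ∑ k ∈ Finset.range (m + 1), ((Nat.choose m (2*k) : ℤ) * (Nat.choose (2*k) k : ℤ))
def pvV (m : ℕ) : ℤ := ∑ j ∈ Finset.range (m + 1), ((Nat.choose m (2*j+1) : ℤ) * (Nat.choose (2*j+1) j : ℤ))
-- the sequence A computes: a(n) = T(n) + T(n-1), a(0) := 0 (A's dummy list head)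
def pvF (n : ℕ) : ℤ := if n = 0 then 0 else pvT n + pvT (n - 1)

-- exact floor division
lemma pv_fdiv_exact (d X : ℤ) (hd : 0 < d) : PySem.Int.floordiv (d * X) d = X := by
  rw [PySem.Int.floordiv_eq_iff_of_pos hd]
  constructor <;> nlinarith

-- the T-sum is range-insensitive once the range covers m/2
lemma pv_tsum (m N : ℕ) (h : m / 2 < N) :
    (∑ k ∈ Finset.range N, ((Nat.choose m (2*k) : ℤ) * (Nat.choose (2*k) k : ℤ))) = pvT m := by
  have key : ∀ M : ℕ, m / 2 < M →
      (∑ k ∈ Finset.range M, ((Nat.choose m (2*k) : ℤ) * (Nat.choose (2*k) k : ℤ)))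
        = ∑ k ∈ Finset.range (m / 2 + 1), ((Nat.choose m (2*k) : ℤ) * (Nat.choose (2*k) k : ℤ)) := by
    intro M hM
    refine (Finset.sum_subset (by intro x hx; simp only [Finset.mem_range] at *; omega) ?_).symm
    intro k _ hk
    have hk' : m / 2 + 1 ≤ k := by simpa [Finset.mem_range] using hk
    have : m < 2 * k := by omega
    simp [Nat.choose_eq_zero_of_lt this]
  rw [key N h, ← key (m + 1) (by omega)]
  rfl

-- E4: C(2j+2, j+1) = 2·C(2j+1, j)
lemma pv_hs (j : ℕ) : Nat.choose (2*j+1) (j+1) = Nat.choose (2*j+1) j := by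
  have h := Nat.choose_symm (n := 2*j+1) (k := j+1) (by omega)
  rw [show 2*j+1 - (j+1) = j by omega] at h
  exact h.symm

lemma pv_E4 (j : ℕ) : Nat.choose (2*j+2) (j+1) = 2 * Nat.choose (2*j+1) j := by
  have h := Nat.choose_succ_succ (2*j+1) j
  simp only [Nat.succ_eq_add_one] at h
  rw [show 2*j+1+1 = 2*j+2 by omega] at h
  rw [h, pv_hs j]
  omega

-- P1: T(n+1) = T(n) + 2·V(n)  (Pascal on the first factor, term by term)
lemma pv_P1 (n : ℕ) : pvT (n+1) = pvT n + 2 * pvV n := by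
  have hsplit : pvT (n+1)
      = (∑ j ∈ Finset.range (n+1),
          ((Nat.choose (n+1) (2*(j+1)) : ℤ) * (Nat.choose (2*(j+1)) (j+1) : ℤ))) + 1 := by
    unfold pvT
    rw [Finset.sum_range_succ' (fun k => ((Nat.choose (n+1) (2*k) : ℤ) * (Nat.choose (2*k) k : ℤ))) (n+1)]
    norm_num
  have hterm : ∀ j : ℕ,
      ((Nat.choose (n+1) (2*(j+1)) : ℤ) * (Nat.choose (2*(j+1)) (j+1) : ℤ))
        = 2 * ((Nat.choose n (2*j+1) : ℤ) * (Nat.choose (2*j+1) j : ℤ))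
          + ((Nat.choose n (2*(j+1)) : ℤ) * (Nat.choose (2*(j+1)) (j+1) : ℤ)) := by
    intro j
    have hp : Nat.choose (n+1) (2*j+2) = Nat.choose n (2*j+1) + Nat.choose n (2*j+2) :=
      Nat.choose_succ_succ n (2*j+1)
    have he := pv_E4 j
    have h2 : 2*(j+1) = 2*j+2 := by ring
    rw [h2]
    push_cast [hp, he]
    ring
  have hsum2 : (∑ j ∈ Finset.range (n+1),
      ((Nat.choose n (2*(j+1)) : ℤ) * (Nat.choose (2*(j+1)) (j+1) : ℤ))) = pvT n - 1 := by
    have h1 := Finset.sum_range_succ' (fun k => ((Nat.choose n (2*k) : ℤ) * (Nat.choose (2*k) k : ℤ))) (n+1)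
    have h2 : (∑ k ∈ Finset.range (n+2), ((Nat.choose n (2*k) : ℤ) * (Nat.choose (2*k) k : ℤ))) = pvT n := by
      rw [Finset.sum_range_succ]
      have : Nat.choose n (2*(n+1)) = 0 := Nat.choose_eq_zero_of_lt (by omega)
      simp [pvT, this]
    simp only [h2] at h1
    norm_num at h1
    linarith [h1]
  calc pvT (n+1)
      = (∑ j ∈ Finset.range (n+1),
          ((Nat.choose (n+1) (2*(j+1)) : ℤ) * (Nat.choose (2*(j+1)) (j+1) : ℤ))) + 1 := hsplit
    _ = (∑ j ∈ Finset.range (n+1),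
          (2 * ((Nat.choose n (2*j+1) : ℤ) * (Nat.choose (2*j+1) j : ℤ))
            + ((Nat.choose n (2*(j+1)) : ℤ) * (Nat.choose (2*(j+1)) (j+1) : ℤ)))) + 1 := by
          rw [Finset.sum_congr rfl (fun j _ => hterm j)]
    _ = 2 * pvV n + (pvT n - 1) + 1 := by
          rw [Finset.sum_add_distrib, ← Finset.mul_sum, hsum2]; rfl
    _ = pvT n + 2 * pvV n := by ring

-- P2, term by term: (n+2)·C(n+1,2j+1)·C(2j+1,j) = 2(n+1)·C(n,2j)·C(2j,j) + (n+1)·C(n,2j+1)·C(2j+1,j)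
lemma pv_P2t (n j : ℕ) :
    ((n : ℤ)+2) * (Nat.choose (n+1) (2*j+1) : ℤ) * (Nat.choose (2*j+1) j : ℤ)
      = 2*((n : ℤ)+1) * (Nat.choose n (2*j) : ℤ) * (Nat.choose (2*j) j : ℤ)
        + ((n : ℤ)+1) * (Nat.choose n (2*j+1) : ℤ) * (Nat.choose (2*j+1) j : ℤ) := by
  have h1 : (n+1) * Nat.choose n (2*j) = Nat.choose (n+1) (2*j+1) * (2*j+1) := by
    simpa using Nat.add_one_mul_choose_eq n (2*j)
  have h2 : (2*j+1) * Nat.choose (2*j) j = Nat.choose (2*j+1) j * (j+1) := by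
    have h := Nat.add_one_mul_choose_eq (2*j) j
    rw [pv_hs j] at h
    exact h
  have h3 : Nat.choose (n+1) (2*j+1) = Nat.choose n (2*j) + Nat.choose n (2*j+1) :=
    Nat.choose_succ_succ n (2*j)
  have h1' : ((n : ℤ)+1) * (Nat.choose n (2*j) : ℤ) = (Nat.choose (n+1) (2*j+1) : ℤ) * (2*(j:ℤ)+1) := by
    exact_mod_cast h1
  have h2' : (2*(j:ℤ)+1) * (Nat.choose (2*j) j : ℤ) = (Nat.choose (2*j+1) j : ℤ) * ((j:ℤ)+1) := by
    exact_mod_cast h2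
  have h3' : (Nat.choose (n+1) (2*j+1) : ℤ) = (Nat.choose n (2*j) : ℤ) + (Nat.choose n (2*j+1) : ℤ) := by
    exact_mod_cast h3
  linear_combination ((Nat.choose (2*j+1) j : ℤ) - 2 * (Nat.choose (2*j) j : ℤ)) * h1'
    - 2 * (Nat.choose (n+1) (2*j+1) : ℤ) * h2'
    + ((n : ℤ)+1) * (Nat.choose (2*j+1) j : ℤ) * h3'

-- P2 summed: (n+2)·V(n+1) = 2(n+1)·T(n) + (n+1)·V(n)
lemma pv_P2 (n : ℕ) : ((n:ℤ)+2) * pvV (n+1) = 2*((n:ℤ)+1) * pvT n + ((n:ℤ)+1) * pvV n := by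
  have hT : pvT n = ∑ k ∈ Finset.range (n+2), ((Nat.choose n (2*k) : ℤ) * (Nat.choose (2*k) k : ℤ)) := by
    rw [Finset.sum_range_succ]
    have : Nat.choose n (2*(n+1)) = 0 := Nat.choose_eq_zero_of_lt (by omega)
    simp [pvT, this]
  have hV : pvV n = ∑ j ∈ Finset.range (n+2), ((Nat.choose n (2*j+1) : ℤ) * (Nat.choose (2*j+1) j : ℤ)) := by
    rw [Finset.sum_range_succ]
    have : Nat.choose n (2*(n+1)+1) = 0 := Nat.choose_eq_zero_of_lt (by omega)
    simp [pvV, this]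
  rw [hT, hV]
  have hV1 : pvV (n+1) = ∑ j ∈ Finset.range (n+2), ((Nat.choose (n+1) (2*j+1) : ℤ) * (Nat.choose (2*j+1) j : ℤ)) := by
    simp [pvV]
  rw [hV1, Finset.mul_sum, Finset.mul_sum, Finset.mul_sum, ← Finset.sum_add_distrib]
  refine Finset.sum_congr rfl ?_
  intro j _
  have := pv_P2t n j
  linear_combination this

-- P3: the trinomial P-recurrence (n+2)·T(n+2) = (2n+3)·T(n+1) + 3(n+1)·T(n)
lemma pv_P3 (n : ℕ) : ((n:ℤ)+2) * pvT (n+2) = (2*(n:ℤ)+3) * pvT (n+1) + 3*((n:ℤ)+1) * pvT n := by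
  have p1a := pv_P1 n
  have p1b := pv_P1 (n+1)
  have p2 := pv_P2 n
  push_cast at p1b ⊢
  linear_combination ((n:ℤ)+2) * p1b + 2 * p2 - ((n:ℤ)+1) * p1a

-- A's recurrence, exactly: (n+3)·a(n+3) = 2(n+3)·a(n+2) + 3(n+1)·a(n+1)
lemma pv_F_rec (n : ℕ) :
    ((n:ℤ)+3) * pvF (n+3) = 2*((n:ℤ)+3) * pvF (n+2) + 3*((n:ℤ)+1) * pvF (n+1) := by
  have p3a := pv_P3 n
  have p3b := pv_P3 (n+1)
  push_cast at p3b
  simp only [pvF, Nat.add_sub_cancel, if_neg (by omega : ¬ n+3 = 0),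
    if_neg (by omega : ¬ n+2 = 0), if_neg (by omega : ¬ n+1 = 0)]
  push_cast
  linear_combination p3b + p3a

lemma pvT0 : pvT 0 = 1 := by simp [pvT]
lemma pvT1 : pvT 1 = 1 := by simp [pvT, Finset.sum_range_succ]
lemma pvT2 : pvT 2 = 3 := by simp [pvT, Finset.sum_range_succ]

-- ==== A-side: the DP list is [pvF 0, …, pvF (j+2)] ====
lemma pv_A_inv (j : ℕ) :
    (PySem.List.pyRange 3 ((j : Int) + 3) 1).foldl pvStepA [0, 2, 4]
      = (List.range (j+3)).map pvF := by
  induction j with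
  | zero =>
      rw [PySem.List.pyRange_one_eq_nil (by norm_num)]
      simp [List.range_succ, pvF, pvT0, pvT1, pvT2]
  | succ j ih =>
      have hr : PySem.List.pyRange 3 ((j : Int) + 1 + 3) 1
          = PySem.List.pyRange 3 ((j : Int) + 3) 1 ++ [(j : Int) + 3] := by
        have := PySem.List.pyRange_one_succ_right (a := 3) (b := (j : Int) + 3) (by omega)
        rw [show (j : Int) + 1 + 3 = (j : Int) + 3 + 1 by ring, this]
      push_cast
      rw [hr, List.foldl_append, ih]
      simp only [List.foldl_cons, List.foldl_nil, pvStepA]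
      have hg1 : PySem.List.pyGetD ((List.range (j+3)).map pvF) ((j : Int) + 3 - 1) 0 = pvF (j+2) := by
        have : (j : Int) + 3 - 1 = ((j + 2 : ℕ) : Int) := by push_cast; ring
        rw [this, PySem.List.pyGetD_natCast]
        simp [List.getD]
      have hg2 : PySem.List.pyGetD ((List.range (j+3)).map pvF) ((j : Int) + 3 - 2) 0 = pvF (j+1) := by
        have : (j : Int) + 3 - 2 = ((j + 1 : ℕ) : Int) := by push_cast; ring
        rw [this, PySem.List.pyGetD_natCast]
        simp [List.getD]
      rw [hg1, hg2]
      have hval : 2 * ((j : Int) + 3) * pvF (j+2) + 3 * ((j : Int) + 3 - 2) * pvF (j+1)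
          = ((j : Int) + 3) * pvF (j+3) := by
        have := pv_F_rec j
        linear_combination -this
      rw [hval, pv_fdiv_exact _ _ (by omega)]
      rw [show j + 1 + 3 = (j + 3) + 1 by ring]
      simp [List.range_succ]

-- multiplicative binomial updates (unconditional ℕ identities)
lemma pv_ch1 (m t : ℕ) :
    Nat.choose m (2*t) * (m - 2*t) * (m - (2*t) - 1) = (2*t+1) * ((2*t+2) * Nat.choose m (2*t+2)) := by
  have h1 : Nat.choose m (2*t+1) * (2*t+1) = Nat.choose m (2*t) * (m - 2*t) :=
    Nat.choose_succ_right_eq m (2*t)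
  have h2 : Nat.choose m (2*t+2) * (2*t+2) = Nat.choose m (2*t+1) * (m - (2*t+1)) :=
    Nat.choose_succ_right_eq m (2*t+1)
  have hsub : m - (2*t) - 1 = m - (2*t+1) := by omega
  calc Nat.choose m (2*t) * (m - 2*t) * (m - (2*t) - 1)
      = Nat.choose m (2*t+1) * (2*t+1) * (m - (2*t+1)) := by rw [← h1, hsub]
    _ = (2*t+1) * (Nat.choose m (2*t+1) * (m - (2*t+1))) := by ring
    _ = (2*t+1) * (Nat.choose m (2*t+2) * (2*t+2)) := by rw [← h2]
    _ = (2*t+1) * ((2*t+2) * Nat.choose m (2*t+2)) := by ring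

lemma pv_ch2 (t : ℕ) :
    Nat.choose (2*t) t * (2*t+1) * (2*t+2) = (t+1) * ((t+1) * Nat.choose (2*t+2) (t+1)) := by
  have h1 : (2*t+1) * Nat.choose (2*t) t = Nat.choose (2*t+1) (t+1) * (t+1) := by
    simpa using Nat.add_one_mul_choose_eq (2*t) t
  have hs : Nat.choose (2*t+1) (t+1) = Nat.choose (2*t+1) t := by
    exact pv_hs t
  have h2 : (2*t+2) * Nat.choose (2*t+1) t = Nat.choose (2*t+2) (t+1) * (t+1) := by
    simpa using Nat.add_one_mul_choose_eq (2*t+1) t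
  calc Nat.choose (2*t) t * (2*t+1) * (2*t+2)
      = ((2*t+1) * Nat.choose (2*t) t) * (2*t+2) := by ring
    _ = (Nat.choose (2*t+1) t * (t+1)) * (2*t+2) := by rw [h1, hs]
    _ = ((2*t+2) * Nat.choose (2*t+1) t) * (t+1) := by ring
    _ = (Nat.choose (2*t+2) (t+1) * (t+1)) * (t+1) := by rw [h2]
    _ = (t+1) * ((t+1) * Nat.choose (2*t+2) (t+1)) := by ring

-- combined ratio of the summand u_k = C(m,2k)·C(2k,k)
lemma pv_ch3 (m t : ℕ) :
    (Nat.choose m (2*t) * Nat.choose (2*t) t) * (m - 2*t) * (m - 2*t - 1)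
      = (t+1) * ((t+1) * (Nat.choose m (2*t+2) * Nat.choose (2*t+2) (t+1))) := by
  calc (Nat.choose m (2*t) * Nat.choose (2*t) t) * (m - 2*t) * (m - 2*t - 1)
      = (Nat.choose m (2*t) * (m - 2*t) * (m - (2*t) - 1)) * Nat.choose (2*t) t := by ring
    _ = ((2*t+1) * ((2*t+2) * Nat.choose m (2*t+2))) * Nat.choose (2*t) t := by rw [pv_ch1]
    _ = (Nat.choose (2*t) t * (2*t+1) * (2*t+2)) * Nat.choose m (2*t+2) := by ring
    _ = ((t+1) * ((t+1) * Nat.choose (2*t+2) (t+1))) * Nat.choose m (2*t+2) := by rw [pv_ch2]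
    _ = (t+1) * ((t+1) * (Nat.choose m (2*t+2) * Nat.choose (2*t+2) (t+1))) := by ring

-- ==== B-side loop invariant for trinomial(m) ====
lemma pv_B_inv (m : ℕ) (t : ℕ) (ht : t ≤ m / 2) :
    (PySem.List.pyRange 0 (t : Int) 1).foldl (pvStepT (m : Int)) (0, 1)
      = (∑ k ∈ Finset.range t, ((Nat.choose m (2*k) : ℤ) * (Nat.choose (2*k) k : ℤ)),
         ((Nat.choose m (2*t) * Nat.choose (2*t) t : ℕ) : ℤ)) := by
  induction t with
  | zero =>
      rw [show ((0:ℕ) : Int) = 0 by norm_num, PySem.List.pyRange_one_eq_nil (by norm_num)]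
      simp
  | succ t ih =>
      have ht' : t ≤ m / 2 := by omega
      have h2t : 2*t + 2 ≤ m := by omega
      have hr : PySem.List.pyRange 0 (((t+1 : ℕ)) : Int) 1
          = PySem.List.pyRange 0 (t : Int) 1 ++ [(t : Int)] := by
        push_cast
        exact PySem.List.pyRange_one_succ_right (a := 0) (b := (t : Int)) (by positivity)
      rw [hr, List.foldl_append, ih ht']
      simp only [List.foldl_cons, List.foldl_nil, pvStepT]
      refine Prod.ext ?_ ?_
      · rw [Finset.sum_range_succ]
        push_cast
        ring
      · have e1 : ((m : Int) - 2*(t:Int)) = ((m - 2*t : ℕ) : Int) := by omega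
        have e2 : ((m : Int) - 2*(t:Int) - 1) = ((m - 2*t - 1 : ℕ) : Int) := by omega
        have hnat : (Nat.choose m (2*t) * Nat.choose (2*t) t) * (m - 2*t) * (m - 2*t - 1)
            = (t+1) * (t+1) * (Nat.choose m (2*t+2) * Nat.choose (2*t+2) (t+1)) := by
          rw [pv_ch3 m t]; ring
        have hc : ((Nat.choose m (2*t) * Nat.choose (2*t) t : ℕ) : ℤ) * ((m : Int) - 2*(t:Int)) * ((m : Int) - 2*(t:Int) - 1)
            = (((t:Int)+1) * ((t:Int)+1)) * ((Nat.choose m (2*t+2) * Nat.choose (2*t+2) (t+1) : ℕ) : ℤ) := by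
          rw [e2, e1]; exact_mod_cast hnat
        simp only [hc]
        rw [pv_fdiv_exact _ _ (by positivity)]
        rw [show 2*(t+1) = 2*t+2 by ring]

-- trinomial(m) = T(m)
lemma pv_tri_val (m : ℕ) : pvTri (m : Int) = pvT m := by
  unfold pvTri
  have hfd : PySem.Int.floordiv (m : Int) 2 = ((m / 2 : ℕ) : Int) := by
    exact_mod_cast PySem.Int.floordiv_natCast m 2
  rw [hfd]
  have hr : PySem.List.pyRange 0 (((m/2 : ℕ) : Int) + 1) 1
      = PySem.List.pyRange 0 ((m/2 : ℕ) : Int) 1 ++ [((m/2 : ℕ) : Int)] :=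
    PySem.List.pyRange_one_succ_right (a := 0) (b := ((m/2 : ℕ) : Int)) (by positivity)
  rw [hr, List.foldl_append, pv_B_inv m (m/2) (le_refl _)]
  simp only [List.foldl_cons, List.foldl_nil, pvStepT]
  have : (∑ k ∈ Finset.range (m/2), ((Nat.choose m (2*k) : ℤ) * (Nat.choose (2*k) k : ℤ)))
      + ((Nat.choose m (2*(m/2)) * Nat.choose (2*(m/2)) (m/2) : ℕ) : ℤ)
      = ∑ k ∈ Finset.range (m/2 + 1), ((Nat.choose m (2*k) : ℤ) * (Nat.choose (2*k) k : ℤ)) := by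
    rw [Finset.sum_range_succ]; push_cast; ring
  rw [this, pv_tsum m (m/2 + 1) (by omega)]

-- B's value for w ≥ 1 is T(w) + T(w-1)
lemma pv_B_val (w : ℕ) (hw : 1 ≤ w) :
    betagamma_bar_cohomology_formula_alt (w : Int) = pvT w + pvT (w - 1) := by
  unfold betagamma_bar_cohomology_formula_alt
  rw [if_neg (by exact_mod_cast by omega)]
  have h1 : (w : Int) - 1 = ((w - 1 : ℕ) : Int) := by omega
  rw [h1, pv_tri_val w, pv_tri_val (w-1)]

-- ===== VERDICT (by name: the statement is the Claim_ definition above) =====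
theorem betagamma_bar_cohomology_formula_spec : Claim_equal_betagamma_bar_cohomology_formula := by
  intro weight _
  unfold Spec_betagamma_bar_cohomology_formula
  by_cases h0 : weight < 1
  · unfold betagamma_bar_cohomology_formula betagamma_bar_cohomology_formula_alt
    simp [h0]
  · have hw1 : 1 ≤ weight := by omega
    obtain ⟨w, rfl⟩ : ∃ w : ℕ, weight = (w : Int) := ⟨weight.toNat, by omega⟩
    have hw : 1 ≤ w := by exact_mod_cast hw1
    rw [pv_B_val w hw]
    unfold betagamma_bar_cohomology_formula
    rw [if_neg h0]
    by_cases hw1' : (w : Int) = 1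
    · have : w = 1 := by exact_mod_cast hw1'
      subst this
      simp [pvT0, pvT1]
    by_cases hw2' : (w : Int) = 2
    · have : w = 2 := by exact_mod_cast hw2'
      subst this
      simp [pvT1, pvT2]
    · have hw3 : 3 ≤ w := by
        have : (w : Int) ≠ 1 := hw1'
        have : (w : Int) ≠ 2 := hw2'
        omega
      rw [if_neg hw1', if_neg hw2']
      have hj : ∃ j : ℕ, w = j + 3 := ⟨w - 3, by omega⟩
      obtain ⟨j, rfl⟩ := hj
      have hcast : ((j + 3 : ℕ) : Int) + 1 = ((j+1 : ℕ) : Int) + 3 := by push_cast; ring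
      simp only [hcast]
      rw [pv_A_inv (j+1)]
      have : ((j + 3 : ℕ) : Int) = ((j + 3 : ℕ) : Int) := rfl
      rw [show ((j + 3 : ℕ) : Int) = (((j+3) : ℕ) : Int) from rfl, PySem.List.pyGetD_natCast]
      have hlt : j + 3 < j + 1 + 3 := by omega
      simp only [List.getD, List.getElem?_map]
      rw [List.getElem?_range hlt]
      simp [pvF]
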